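-- pv_equiv track=rewrite | github.com/sammywachtel/harmonic-analysis | src/harmonic_analysis/services/multiple_interpretation_service.py | _is_sequential_progression
-- ===== SOURCE A (Python) =====
-- from typing import Dict, List, Optional, cast
--
-- def _is_sequential_progression(roman_numerals: List[str]) -> bool:
--     """Check if progression follows sequential harmonic logic"""
--     # Examples: I-ii-iii-IV, vi-vii-I-ii, etc.
--     if len(roman_numerals) < 3:
--         return False
--
--     # Convert roman numerals to scale degrees for sequence detection
--     degree_map = {
--         "I": 1,
--         "ii": 2,
--         "iii": 3,
--         "IV": 4,
--         "V": 5,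
--         "vi": 6,
--         "vii": 7,
--         "i": 1,
--         "II": 2,
--         "III": 3,
--         "iv": 4,
--         "v": 5,
--         "VI": 6,
--         "VII": 7,
--     }
--
--     try:
--         degrees = [degree_map.get(rn.rstrip("7o"), 0) for rn in roman_numerals]
--
--         # Check for ascending or descending sequences
--         if all(
--             degrees[i] + 1 == degrees[i + 1] or degrees[i] - 6 == degrees[i + 1]
--             for i in range(len(degrees) - 1)
--         ):
--             return True  # Ascending sequence
--         if all(
--             degrees[i] - 1 == degrees[i + 1] or degrees[i] + 6 == degrees[i + 1]
--             for i in range(len(degrees) - 1)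
--         ):
--             return True  # Descending sequence
--
--     except (KeyError, IndexError):
--         pass
--
--     return False
-- ===== SOURCE B (Python) =====
-- def _is_sequential_progression(roman_numerals):
--     """Check if progression follows sequential harmonic logic"""
--     if len(roman_numerals) < 3:
--         return False
--
--     degree_map = {
--         "I": 1, "ii": 2, "iii": 3, "IV": 4, "V": 5, "vi": 6, "vii": 7,
--         "i": 1, "II": 2, "III": 3, "iv": 4, "v": 5, "VI": 6, "VII": 7,
--     }
--
--     # reduce each chord to its scale-degree residue mod 7
--     residues = [degree_map.get(rn.rstrip("7o"), 0) % 7 for rn in roman_numerals]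
--     n = len(residues)
--     # synthesize the two possible target sequences anchored at the first residue
--     up = [(residues[0] + i) % 7 for i in range(n)]
--     down = [(residues[0] - i) % 7 for i in range(n)]
--     return residues == up or residues == down
-- ===== Notes on version B (the rewrite author's own statement) =====
-- stated objective: alternative
-- what changed: Instead of scanning consecutive pairs with two all() predicates, B reduces degrees to residues mod 7, synthesizes the two full target arithmetic sequences (ascending/descending) anchored at the first residue, and decides by whole-list equality.
import Mathlib
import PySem

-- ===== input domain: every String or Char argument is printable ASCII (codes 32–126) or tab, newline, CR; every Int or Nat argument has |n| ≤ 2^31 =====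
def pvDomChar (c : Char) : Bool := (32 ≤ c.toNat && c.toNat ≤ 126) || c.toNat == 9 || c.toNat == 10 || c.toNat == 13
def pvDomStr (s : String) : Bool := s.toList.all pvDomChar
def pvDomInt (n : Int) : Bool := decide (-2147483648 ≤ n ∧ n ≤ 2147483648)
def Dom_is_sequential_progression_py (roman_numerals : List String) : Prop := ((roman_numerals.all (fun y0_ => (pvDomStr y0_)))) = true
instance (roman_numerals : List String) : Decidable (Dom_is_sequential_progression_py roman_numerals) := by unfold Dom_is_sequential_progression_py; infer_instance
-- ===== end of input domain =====

-- B replaces A's pairwise consecutive-step scans by synthesizing the two full target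
-- sequences (ascending/descending mod-7 progressions anchored at the first residue) and
-- comparing whole lists; objective: alternative.

-- ===== PORT A =====
-- the literal degree_map (identical in both Pythons, so shared by both ports)
def pvDegreeMap : PySem.Dict String Int :=
  PySem.Dict.ofList [("I",1),("ii",2),("iii",3),("IV",4),("V",5),("vi",6),("vii",7),
                     ("i",1),("II",2),("III",3),("iv",4),("v",5),("VI",6),("VII",7)]

-- rn.rstrip("7o"): drop trailing characters from {'7','o'} (exact hand port; PySem has no chars-rstrip)
def pvRstrip7o (s : String) : String :=
  String.ofList ((s.toList.reverse.dropWhile (fun c => c == '7' || c == 'o')).reverse)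

def is_sequential_progression_py (roman_numerals : List String) : Bool :=
  if roman_numerals.length < 3 then false
  else
    let degrees : List Int := roman_numerals.map (fun rn => pvDegreeMap.getD (pvRstrip7o rn) 0)
    if (List.range (degrees.length - 1)).all (fun i =>
        degrees.getD i 0 + 1 == degrees.getD (i+1) 0 || degrees.getD i 0 - 6 == degrees.getD (i+1) 0)
    then true
    else if (List.range (degrees.length - 1)).all (fun i =>
        degrees.getD i 0 - 1 == degrees.getD (i+1) 0 || degrees.getD i 0 + 6 == degrees.getD (i+1) 0)
    then true
    else false

-- ===== PORT B =====
def is_sequential_progression_py_alt (roman_numerals : List String) : Bool :=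
  if roman_numerals.length < 3 then false
  else
    let residues : List Int := roman_numerals.map (fun rn =>
      PySem.Int.mod (pvDegreeMap.getD (pvRstrip7o rn) 0) 7)
    let n := residues.length
    let r0 := residues.getD 0 0
    let up : List Int := (List.range n).map (fun (i : Nat) => PySem.Int.mod (r0 + (i : Int)) 7)
    let down : List Int := (List.range n).map (fun (i : Nat) => PySem.Int.mod (r0 - (i : Int)) 7)
    residues == up || residues == down

-- ===== PRECONDITION & SPEC =====
def Spec_is_sequential_progression_py (roman_numerals : List String) (out : Bool) : Prop := out = is_sequential_progression_py_alt roman_numerals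
instance (roman_numerals : List String) (out : Bool) : Decidable (Spec_is_sequential_progression_py roman_numerals out) := by unfold Spec_is_sequential_progression_py; infer_instance

-- ===== CLAIM (what is proved, stated in full; the proofs are below) =====
def Claim_equal_is_sequential_progression_py : Prop := ∀ (roman_numerals : List String), Dom_is_sequential_progression_py roman_numerals → Spec_is_sequential_progression_py roman_numerals (is_sequential_progression_py roman_numerals)

-- ===== LEMMAS AND PROOFS =====

-- PySem.Int.mod by 7 is Int.emod by 7
lemma pvmod7 (a : Int) : PySem.Int.mod a 7 = a % 7 := by
  simp [PySem.Int.mod, Int.fmod_eq_emod]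

lemma get?_mem_values (l : List (String × Int)) (k : String) (v : Int)
    (h : (PySem.Dict.mk l).get? k = some v) : v ∈ l.map (·.2) := by
  induction l with
  | nil => simp [PySem.Dict.get?] at h
  | cons p t ih =>
    rw [show (p :: t) = ((p.1, p.2) :: t) by simp, PySem.Dict.get?_mk_cons] at h
    by_cases hk : p.1 == k
    · simp [hk] at h; simp [h]
    · simp [hk] at h; simp [ih h]

-- every degree produced through the map lies in 0..7
lemma pvDeg_bounds (s : String) :
    0 ≤ pvDegreeMap.getD s 0 ∧ pvDegreeMap.getD s 0 ≤ 7 := by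
  have hd : pvDegreeMap.getD s 0 = (pvDegreeMap.get? s).getD 0 := rfl
  rcases hv : pvDegreeMap.get? s with _ | v
  · simp [hd, hv]
  · have hm : pvDegreeMap = PySem.Dict.mk [("I",1),("ii",2),("iii",3),("IV",4),("V",5),("vi",6),("vii",7),
        ("i",1),("II",2),("III",3),("iv",4),("v",5),("VI",6),("VII",7)] := by rfl
    have := get?_mem_values _ s v (hm ▸ hv)
    simp at this
    simp [hd, hv]
    omega

-- A's ascending pair test on bounded degrees ⟺ the residue of b is the residue of a stepped by +1
lemma pair_asc (a b : Int) (ha : 0 ≤ a ∧ a ≤ 7) (hb : 0 ≤ b ∧ b ≤ 7) :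
    ((a + 1 == b || a - 6 == b) = true) ↔ b % 7 = (a % 7 + 1) % 7 := by
  simp only [Bool.or_eq_true, beq_iff_eq]
  omega

-- A's descending pair test on bounded degrees ⟺ the residue of b is the residue of a stepped by -1
lemma pair_desc (a b : Int) (ha : 0 ≤ a ∧ a ≤ 7) (hb : 0 ≤ b ∧ b ≤ 7) :
    ((a - 1 == b || a + 6 == b) = true) ↔ b % 7 = (a % 7 + (-1)) % 7 := by
  simp only [Bool.or_eq_true, beq_iff_eq]
  omega

-- adding after reducing mod 7 is adding before reducing
lemma emod_absorb (x s : Int) : (x % 7 + s) % 7 = (x + s) % 7 := by omega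

-- a chain of single steps anchors the whole list to an affine mod-7 progression
lemma chain_iff_affine (r : List Int) (step : Int)
    (hred : ∀ x ∈ r, x % 7 = x) :
    (∀ i, i + 1 < r.length → r.getD (i+1) 0 = (r.getD i 0 + step) % 7)
      ↔ (∀ i, i < r.length → r.getD i 0 = (r.getD 0 0 + step * i) % 7) := by
  constructor
  · intro h i
    induction i with
    | zero =>
      intro h0
      have hmem : r.getD 0 0 ∈ r := by
        rw [List.getD_eq_getElem _ _ (by omega)]
        exact List.getElem_mem _
      simpa using (hred _ hmem).symm
    | succ k ih =>
      intro hk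
      have hkk : k < r.length := by omega
      rw [h k (by omega), ih hkk, emod_absorb]
      congr 1
      push_cast
      ring
  · intro h i hi
    rw [h (i+1) (by omega), h i (by omega), emod_absorb]
    congr 1
    push_cast
    ring

-- list equality with a range-map, elementwise
lemma eq_map_range (r : List Int) (f : Nat → Int) :
    (r == (List.range r.length).map f) = true ↔ ∀ i, (hi : i < r.length) → r.getD i 0 = f i := by
  rw [beq_iff_eq]
  constructor
  · intro h i hi
    conv_lhs => rw [h]
    rw [List.getD_eq_getElem _ _ (by simpa using hi)]
    simp
  · intro h
    apply List.ext_getElem (by simp)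
    intro i h1 h2
    have := h i h1
    rw [List.getD_eq_getElem _ _ h1] at this
    simpa using this

-- ===== VERDICT (by name: the statement is the Claim_ definition above) =====
-- degrees are bounded at every index (default 0 included)
lemma deg_getD_bounds (rn : List String) (i : Nat) :
    0 ≤ (rn.map (fun r => pvDegreeMap.getD (pvRstrip7o r) 0)).getD i 0 ∧
      (rn.map (fun r => pvDegreeMap.getD (pvRstrip7o r) 0)).getD i 0 ≤ 7 := by
  have hb : ∀ x ∈ rn.map (fun r => pvDegreeMap.getD (pvRstrip7o r) 0), 0 ≤ x ∧ x ≤ 7 := by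
    intro x hx
    rcases List.mem_map.mp hx with ⟨r, _, rfl⟩
    exact pvDeg_bounds _
  by_cases hi : i < (rn.map (fun r => pvDegreeMap.getD (pvRstrip7o r) 0)).length
  · rw [List.getD_eq_getElem _ _ hi]
    exact hb _ (List.getElem_mem _)
  · rw [List.getD_eq_default _ _ (by omega)]
    omega

-- getD through the residue map
lemma getD_map_mod (ds : List Int) (i : Nat) :
    (ds.map (fun d => d % 7)).getD i 0 = (ds.getD i 0) % 7 := by
  by_cases hi : i < ds.length
  · rw [List.getD_eq_getElem _ _ (by simpa using hi), List.getD_eq_getElem _ _ hi]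
    simp
  · rw [List.getD_eq_default _ _ (by simpa using hi), List.getD_eq_default _ _ (by omega)]
    norm_num

-- ===== VERDICT (by name: the statement is the Claim_ definition above) =====
theorem is_sequential_progression_py_spec : Claim_equal_is_sequential_progression_py := by
  intro rn _
  unfold Spec_is_sequential_progression_py
  unfold is_sequential_progression_py is_sequential_progression_py_alt
  by_cases h : rn.length < 3
  · simp [h]
  · simp only [if_neg h, pvmod7]
    have hmm : rn.map (fun r => pvDegreeMap.getD (pvRstrip7o r) 0 % 7)
        = (rn.map (fun r => pvDegreeMap.getD (pvRstrip7o r) 0)).map (fun d => d % 7) := by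
      rw [List.map_map]
      rfl
    rw [hmm]
    set ds : List Int := rn.map (fun r => pvDegreeMap.getD (pvRstrip7o r) 0) with hds
    set rs : List Int := ds.map (fun d => d % 7) with hrs
    have hlen : rs.length = ds.length := by simp [hrs]
    have hlen2 : ds.length = rn.length := by simp [hds]
    have hred : ∀ x ∈ rs, x % 7 = x := by
      intro x hx
      rw [hrs] at hx
      rcases List.mem_map.mp hx with ⟨d, _, rfl⟩
      omega
    have hgd : ∀ i, rs.getD i 0 = (ds.getD i 0) % 7 := fun i => getD_map_mod ds i
    have hbd : ∀ i, 0 ≤ ds.getD i 0 ∧ ds.getD i 0 ≤ 7 := by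
      intro i
      rw [hds]
      exact deg_getD_bounds rn i
    -- ascending: A's first all() scan equals B's comparison with the synthesized up-sequence
    have hasc : ((List.range (ds.length - 1)).all (fun i =>
          ds.getD i 0 + 1 == ds.getD (i+1) 0 || ds.getD i 0 - 6 == ds.getD (i+1) 0))
        = (rs == (List.range rs.length).map (fun (i : Nat) => (rs.getD 0 0 + (i : Int)) % 7)) := by
      have hf : (fun (i : Nat) => (rs.getD 0 0 + (i : Int)) % 7)
          = (fun (i : Nat) => (rs.getD 0 0 + 1 * (i : Int)) % 7) := by
        funext i
        ring_nf
      rw [hf, Bool.eq_iff_iff, List.all_eq_true,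
        eq_map_range rs (fun (i : Nat) => (rs.getD 0 0 + 1 * (i : Int)) % 7),
        ← chain_iff_affine rs 1 hred]
      constructor
      · intro hA i hi
        have := hA i (List.mem_range.mpr (by omega))
        rw [hgd i, hgd (i+1)]
        exact (pair_asc _ _ (hbd i) (hbd (i+1))).mp this
      · intro hC i hi
        have hi' : i + 1 < rs.length := by
          have := List.mem_range.mp hi
          omega
        have := hC i hi'
        rw [hgd i, hgd (i+1)] at this
        exact (pair_asc _ _ (hbd i) (hbd (i+1))).mpr this
    -- descending: A's second all() scan equals B's comparison with the synthesized down-sequence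
    have hdesc : ((List.range (ds.length - 1)).all (fun i =>
          ds.getD i 0 - 1 == ds.getD (i+1) 0 || ds.getD i 0 + 6 == ds.getD (i+1) 0))
        = (rs == (List.range rs.length).map (fun (i : Nat) => (rs.getD 0 0 - (i : Int)) % 7)) := by
      have hf : (fun (i : Nat) => (rs.getD 0 0 - (i : Int)) % 7)
          = (fun (i : Nat) => (rs.getD 0 0 + (-1) * (i : Int)) % 7) := by
        funext i
        ring_nf
      rw [hf, Bool.eq_iff_iff, List.all_eq_true,
        eq_map_range rs (fun (i : Nat) => (rs.getD 0 0 + (-1) * (i : Int)) % 7),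
        ← chain_iff_affine rs (-1) hred]
      constructor
      · intro hA i hi
        have := hA i (List.mem_range.mpr (by omega))
        rw [hgd i, hgd (i+1)]
        exact (pair_desc _ _ (hbd i) (hbd (i+1))).mp this
      · intro hC i hi
        have hi' : i + 1 < rs.length := by
          have := List.mem_range.mp hi
          omega
        have := hC i hi'
        rw [hgd i, hgd (i+1)] at this
        exact (pair_desc _ _ (hbd i) (hbd (i+1))).mpr this
    rw [← hasc, ← hdesc]
    cases ((List.range (ds.length - 1)).all (fun i =>
        ds.getD i 0 + 1 == ds.getD (i+1) 0 || ds.getD i 0 - 6 == ds.getD (i+1) 0)) <;>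
      cases ((List.range (ds.length - 1)).all (fun i =>
        ds.getD i 0 - 1 == ds.getD (i+1) 0 || ds.getD i 0 + 6 == ds.getD (i+1) 0)) <;>
      simp
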